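-- pv_equiv track=rewrite | github.com/Sharma30042000/DSA-_Solutions | string/minimumword.py | minword
-- ===== SOURCE A (Python) =====
-- def minword(l):
--     k={}
--     for i in l:
--         s={}
--         for j in i:
--             if j not in s:
--                 s[j]=[j]
--             else:
--                 s[j].append(j)
--         for j in s:
--             if j not in k:
--                 k[j]=s[j]
--             else:
--                 if len(k[j])<len(s[j]):
--                     k[j]=s[j]
--     ans=[]
--     for i in k:
--         ans.extend(k[i])
--     return ans
-- ===== SOURCE B (Python) =====
-- def minword(l):
--     order = list(dict.fromkeys("".join(l)))
--     return [ch for ch in order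
--                for _ in range(max((w.count(ch) for w in l), default=0))]
-- ===== Notes on version B (the rewrite author's own statement) =====
-- stated objective: simpler
-- what changed: B replaces A's streaming dict-of-character-lists accumulation with two staged passes: dedup of the concatenation of all words fixes the output order, then for each distinct character the repeat count is taken as max(w.count(ch) for w in l); no dictionaries are maintained at all.
import Mathlib
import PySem

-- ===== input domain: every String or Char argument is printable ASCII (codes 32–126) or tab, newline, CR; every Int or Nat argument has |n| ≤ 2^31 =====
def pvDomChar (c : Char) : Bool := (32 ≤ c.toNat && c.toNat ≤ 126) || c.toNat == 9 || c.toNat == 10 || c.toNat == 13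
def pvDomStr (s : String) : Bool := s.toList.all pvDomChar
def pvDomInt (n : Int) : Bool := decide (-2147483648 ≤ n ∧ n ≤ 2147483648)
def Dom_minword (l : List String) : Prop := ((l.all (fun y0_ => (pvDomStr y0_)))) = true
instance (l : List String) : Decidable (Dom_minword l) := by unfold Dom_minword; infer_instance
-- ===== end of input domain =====

-- B drops A's streaming dict-of-character-lists entirely: dedup of the concatenation fixes
-- the order, and each char's repeat count is max(w.count(ch) for w in l) (objective: simpler).

-- ===== PORT A =====
-- inner loop body: s[j] = [j] if fresh else s[j].append(j)
def minwordStepS (s : PySem.Dict Char (List Char)) (j : Char) : PySem.Dict Char (List Char) :=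
  match s.get? j with
  | none => s.insert j [j]
  | some v => s.insert j (v ++ [j])

-- merge loop body: k[j] = s[j] if fresh or longer
def minwordMerge (k : PySem.Dict Char (List Char)) (p : Char × List Char) :
    PySem.Dict Char (List Char) :=
  match k.get? p.1 with
  | none => k.insert p.1 p.2
  | some kv => if kv.length < p.2.length then k.insert p.1 p.2 else k

-- one iteration of A's outer 'for i in l' loop
def minwordWord (k : PySem.Dict Char (List Char)) (i : String) : PySem.Dict Char (List Char) :=
  let s := i.toList.foldl minwordStepS PySem.Dict.empty
  s.items.foldl minwordMerge k

def minword (l : List String) : List String :=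
  let k := l.foldl minwordWord PySem.Dict.empty
  (k.items.foldl (fun ans p => ans ++ p.2) []).map (fun c => String.ofList [c])

-- ===== PORT B =====
def minword_alt (l : List String) : List String :=
  let order := PySem.List.dedup (PySem.Str.join "" l).toList
  order.flatMap (fun ch =>
    List.replicate
      (PySem.List.maxD (l.map (fun w => PySem.Str.count w (String.ofList [ch]))) (fun x => x) 0)
      (String.ofList [ch]))

-- ===== PRECONDITION & SPEC =====
def Spec_minword (l : List String) (out : List String) : Prop := out = minword_alt l
instance (l : List String) (out : List String) : Decidable (Spec_minword l out) := by unfold Spec_minword; infer_instance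

-- ===== CLAIM (what is proved, stated in full; the proofs are below) =====
def Claim_equal_minword : Prop := ∀ (l : List String), Dom_minword l → Spec_minword l (minword l)

-- ===== LEMMAS AND PROOFS =====

-- max over the processed words of the count of c in a word
def maxCnt (ws : List String) (c : Char) : Nat :=
  ws.foldl (fun m w => max m (w.toList.count c)) 0

theorem maxCnt_append_singleton (ws : List String) (w : String) (c : Char) :
    maxCnt (ws ++ [w]) c = max (maxCnt ws c) (w.toList.count c) := by
  simp [maxCnt, List.foldl_append]

-- A's inner step is an unconditional insert of getD ++ [j]
theorem minwordStepS_eq (s : PySem.Dict Char (List Char)) (j : Char) :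
    minwordStepS s j = s.insert j (s.getD j [] ++ [j]) := by
  unfold minwordStepS
  cases h : s.get? j with
  | none => simp [PySem.Dict.getD_of_get?_eq_none s ([] : List Char) h]
  | some v => simp [PySem.Dict.getD_of_get?_eq_some s ([] : List Char) h]

theorem sLoop_getD (cs : List Char) :
    ∀ (s : PySem.Dict Char (List Char)) (c : Char),
      (cs.foldl minwordStepS s).getD c [] = s.getD c [] ++ List.replicate (cs.count c) c := by
  induction cs with
  | nil => intro s c; simp
  | cons j cs ih =>
    intro s c
    rw [List.foldl_cons, minwordStepS_eq, ih]
    by_cases hc : c = j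
    · subst hc
      simp [PySem.Dict.getD_insert_self, List.count_cons_self, List.replicate_succ]
    · rw [PySem.Dict.getD_insert_of_ne _ _ _ hc, List.count_cons_of_ne (Ne.symm hc)]

theorem sLoop_keys (cs : List Char) (s : PySem.Dict Char (List Char)) :
    (cs.foldl minwordStepS s).keys = PySem.Set.update s.keys cs := by
  have h : minwordStepS = fun (d : PySem.Dict Char (List Char)) x => d.insert x (d.getD x [] ++ [x]) :=
    funext fun s => funext fun j => minwordStepS_eq s j
  rw [h, PySem.Dict.keys_foldl_insert]

-- a merge step at a key ≠ c does not change getD c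
theorem minwordMerge_getD_ne (k : PySem.Dict Char (List Char)) (p : Char × List Char) (c : Char)
    (h : p.1 ≠ c) : (minwordMerge k p).getD c [] = k.getD c [] := by
  unfold minwordMerge
  split
  · exact PySem.Dict.getD_insert_of_ne _ _ _ (fun hc => h hc.symm)
  · split
    · exact PySem.Dict.getD_insert_of_ne _ _ _ (fun hc => h hc.symm)
    · rfl

theorem minwordMerge_keys (k : PySem.Dict Char (List Char)) (p : Char × List Char) :
    (minwordMerge k p).keys = PySem.Set.add k.keys p.1 := by
  unfold minwordMerge
  split
  · next hnone =>
    have hc : k.contains p.1 = false := by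
      rw [PySem.Dict.contains_eq_isSome_get?, hnone]; rfl
    rw [PySem.Dict.keys_insert_of_not_contains _ _ hc, PySem.Set.add_of_not_mem]
    intro hm
    rw [← PySem.Dict.contains_iff_mem_keys] at hm
    simp [hm] at hc
  · next kv hsome =>
    have hc : k.contains p.1 = true := by
      rw [PySem.Dict.contains_eq_isSome_get?, hsome]; rfl
    have hm : p.1 ∈ k.keys := (PySem.Dict.contains_iff_mem_keys k p.1).mp hc
    split
    · rw [PySem.Dict.keys_insert_of_contains k p.2 hc, PySem.Set.add_of_mem hm]
    · rw [PySem.Set.add_of_mem hm]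

theorem minwordMerge_nodup (k : PySem.Dict Char (List Char)) (p : Char × List Char)
    (h : k.keys.Nodup) : (minwordMerge k p).keys.Nodup := by
  unfold minwordMerge
  split
  · exact PySem.Dict.nodup_keys_insert _ _ _ h
  · split
    · exact PySem.Dict.nodup_keys_insert _ _ _ h
    · exact h

theorem mergeLoop_getD_not_mem (ps : List (Char × List Char)) :
    ∀ (k : PySem.Dict Char (List Char)) (c : Char), c ∉ ps.map Prod.fst →
      (ps.foldl minwordMerge k).getD c [] = k.getD c [] := by
  induction ps with
  | nil => intro k c _; rfl
  | cons p ps ih =>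
    intro k c hc
    simp only [List.map_cons, List.mem_cons, not_or] at hc
    rw [List.foldl_cons, ih _ _ hc.2, minwordMerge_getD_ne _ _ _ (fun h => hc.1 h.symm)]

theorem mergeLoop_getD_mem (ps : List (Char × List Char)) :
    ∀ (k : PySem.Dict Char (List Char)) (c : Char) (v : List Char),
      (ps.map Prod.fst).Nodup → (c, v) ∈ ps → v ≠ [] →
      (ps.foldl minwordMerge k).getD c [] =
        if (k.getD c []).length < v.length then v else k.getD c [] := by
  induction ps with
  | nil => intro k c v _ hm _; cases hm
  | cons p ps ih =>
    intro k c v hnd hm hv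
    simp only [List.map_cons, List.nodup_cons] at hnd
    rw [List.foldl_cons]
    by_cases hp : p.1 = c
    · have hcv : p = (c, v) := by
        rcases List.mem_cons.mp hm with h | h
        · exact h.symm
        · exact absurd (hp ▸ List.mem_map.mpr ⟨(c, v), h, rfl⟩) hnd.1
      have hnt : c ∉ ps.map Prod.fst := hp ▸ hnd.1
      rw [mergeLoop_getD_not_mem _ _ _ hnt, hcv]
      unfold minwordMerge
      split
      · next hnone =>
        rw [PySem.Dict.getD_of_get?_eq_none k ([] : List Char) hnone]
        have hvp : 0 < v.length := List.length_pos_iff.mpr hv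
        simp [PySem.Dict.getD_insert_self, hvp]
      · next kv hsome =>
        rw [PySem.Dict.getD_of_get?_eq_some k ([] : List Char) hsome]
        split
        · simp [PySem.Dict.getD_insert_self]
        · exact PySem.Dict.getD_of_get?_eq_some k ([] : List Char) hsome
    · have hm' : (c, v) ∈ ps := by
        rcases List.mem_cons.mp hm with h | h
        · exact absurd (by rw [← h]) hp
        · exact h
      rw [ih _ _ _ hnd.2 hm' hv, minwordMerge_getD_ne _ _ _ hp]

theorem mergeLoop_keys (ps : List (Char × List Char)) :
    ∀ (k : PySem.Dict Char (List Char)),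
      (ps.foldl minwordMerge k).keys = PySem.Set.update k.keys (ps.map Prod.fst) := by
  induction ps with
  | nil => intro k; rfl
  | cons p ps ih =>
    intro k
    rw [List.foldl_cons, ih, minwordMerge_keys, List.map_cons, PySem.Set.update_cons]

theorem mergeLoop_nodup (ps : List (Char × List Char)) :
    ∀ (k : PySem.Dict Char (List Char)), k.keys.Nodup → (ps.foldl minwordMerge k).keys.Nodup := by
  induction ps with
  | nil => intro k h; exact h
  | cons p ps ih => intro k h; exact ih _ (minwordMerge_nodup _ _ h)

-- ===== A-side invariant =====
def InvA (done : List String) (k : PySem.Dict Char (List Char)) : Prop :=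
  k.keys = PySem.Set.ofList (done.flatMap (·.toList)) ∧ k.keys.Nodup ∧
  ∀ c, k.getD c [] = List.replicate (maxCnt done c) c

theorem invA_step (done : List String) (k : PySem.Dict Char (List Char)) (w : String)
    (h : InvA done k) : InvA (done ++ [w]) (minwordWord k w) := by
  obtain ⟨hk, hnd, hg⟩ := h
  unfold minwordWord
  set s := w.toList.foldl minwordStepS (PySem.Dict.empty : PySem.Dict Char (List Char)) with hs
  have hskeys : s.keys = PySem.Set.ofList w.toList := by
    rw [hs, sLoop_keys]; simp [PySem.Set.update_nil_left, PySem.Dict.keys_empty]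
  have hsnd : s.keys.Nodup := by rw [hskeys]; exact PySem.Set.nodup_ofList _
  have hsget : ∀ c, s.getD c [] = List.replicate (w.toList.count c) c := by
    intro c; rw [hs, sLoop_getD]; simp
  have hitems : s.items = s.keys.map (fun c => (c, s.getD c [])) :=
    PySem.Dict.items_eq_map_keys s hsnd []
  have hfst : s.items.map Prod.fst = s.keys := by
    rw [hitems, List.map_map]; simp [Function.comp_def]
  refine ⟨?_, ?_, ?_⟩
  · rw [mergeLoop_keys, hfst, hskeys, hk, List.flatMap_append]
    simp only [List.flatMap_cons, List.flatMap_nil, List.append_nil]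
    rw [PySem.Set.ofList_append, PySem.Set.update_eq_append_filter,
      PySem.Set.update_eq_append_filter, PySem.Set.ofList_ofList]
  · exact mergeLoop_nodup _ _ hnd
  · intro c
    rw [maxCnt_append_singleton]
    by_cases hc : c ∈ s.keys
    · have hmem : (c, s.getD c []) ∈ s.items := by
        rw [hitems]; exact List.mem_map.mpr ⟨c, hc, rfl⟩
      have hcnt : 0 < w.toList.count c := by
        rw [hskeys, PySem.Set.mem_ofList] at hc
        exact List.count_pos_iff.mpr hc
      have hne : s.getD c [] ≠ [] := by
        rw [hsget]
        intro hnil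
        have := congrArg List.length hnil
        simp at this
        omega
      rw [mergeLoop_getD_mem _ _ _ _ (hfst ▸ hsnd) hmem hne, hg, hsget]
      simp only [List.length_replicate]
      by_cases hlt : maxCnt done c < w.toList.count c
      · rw [if_pos hlt, Nat.max_eq_right (Nat.le_of_lt hlt)]
      · rw [if_neg hlt, Nat.max_eq_left (Nat.le_of_not_lt hlt)]
    · have hc' : c ∉ s.items.map Prod.fst := hfst ▸ hc
      have hcnt : w.toList.count c = 0 := by
        rw [hskeys, PySem.Set.mem_ofList] at hc
        exact List.count_eq_zero.mpr hc
      rw [mergeLoop_getD_not_mem _ _ _ hc', hg, hcnt, Nat.max_eq_left (Nat.zero_le _)]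

theorem invA_fold (ws : List String) :
    ∀ (done : List String) (k : PySem.Dict Char (List Char)), InvA done k →
      InvA (done ++ ws) (ws.foldl minwordWord k) := by
  induction ws with
  | nil => intro done k h; simpa using h
  | cons w ws ih =>
    intro done k h
    have := ih (done ++ [w]) _ (invA_step done k w h)
    simpa using this

-- ===== B-side lemmas =====
-- counting a single-character substring is counting the character
theorem countGo_single (c : Char) (fuel : Nat) :
    ∀ (cs : List Char) (acc : Nat), cs.length ≤ fuel →
      PySem.Chars.count.go [c] fuel cs acc = acc + cs.count c := by
  induction fuel with
  | zero =>
    intro cs acc h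
    cases cs with
    | nil => simp [PySem.Chars.count.go]
    | cons x t => simp at h
  | succ fuel ih =>
    intro cs acc h
    cases cs with
    | nil => simp [PySem.Chars.count.go]
    | cons x t =>
      simp only [List.length_cons, Nat.succ_le_succ_iff] at h
      by_cases hx : c = x
      · subst hx
        have hp : [c].isPrefixOf (c :: t) = true := by simp [List.isPrefixOf]
        simp only [PySem.Chars.count.go, hp, if_true, List.length_cons, List.length_nil,
          List.drop_succ_cons, List.drop_zero]
        rw [ih t (acc + 1) h, List.count_cons_self]
        omega
      · have hp : [c].isPrefixOf (x :: t) = false := by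
          simp [List.isPrefixOf, hx]
        simp only [PySem.Chars.count.go, hp, Bool.false_eq_true, if_false]
        rw [ih t acc h, List.count_cons_of_ne (fun he => hx he.symm)]

theorem strCount_single (w : String) (c : Char) :
    PySem.Str.count w (String.ofList [c]) = w.toList.count c := by
  have h0 : (String.ofList [c]).toList = [c] := by simp
  rw [PySem.Str.count_eq, h0]
  unfold PySem.Chars.count
  simp only [List.isEmpty_cons, Bool.false_eq_true, if_false]
  rw [countGo_single c w.toList.length w.toList 0 (le_refl _)]
  omega

-- max(gen, default=0) over the word counts is maxCnt
theorem maxD_counts (l : List String) (c : Char) :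
    PySem.List.maxD (l.map (fun w => w.toList.count c)) (fun x => x) 0 = maxCnt l c := by
  cases l with
  | nil => simp [PySem.List.maxD_nil, maxCnt]
  | cons w ws =>
    rw [List.map_cons, PySem.List.maxD_id_cons, maxCnt]
    rw [List.foldl_cons, List.foldl_map]
    simp

-- "".join(l) is the concatenation of the words
theorem join_empty_toList (l : List String) :
    (PySem.Str.join "" l).toList = l.flatMap String.toList := by
  induction l with
  | nil => simp [PySem.Str.toList_join]
  | cons w ws ih =>
    cases ws with
    | nil => simp [PySem.Str.toList_join]
    | cons v vs =>
      simp only [PySem.Str.toList_join, List.map_cons] at ih ⊢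
      rw [show ("" : String).toList = [] from rfl] at ih ⊢
      rw [PySem.Chars.join_cons_cons, ih]
      simp

-- ===== VERDICT (by name: the statement is the Claim_ definition above) =====
theorem minword_spec : Claim_equal_minword := by
  intro l _
  unfold Spec_minword minword minword_alt
  have hA : InvA l (l.foldl minwordWord PySem.Dict.empty) := by
    have := invA_fold l [] PySem.Dict.empty ?_
    · simpa using this
    · refine ⟨by simp [PySem.Dict.keys_empty], by simp [PySem.Dict.keys_empty], ?_⟩
      intro c; simp [PySem.Dict.getD_empty, maxCnt]
  obtain ⟨hak, hand, hag⟩ := hA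
  have hAitems : (l.foldl minwordWord PySem.Dict.empty).items
      = (PySem.Set.ofList (l.flatMap (·.toList))).map
          (fun c => (c, List.replicate (maxCnt l c) c)) := by
    rw [PySem.Dict.items_eq_map_keys _ hand [], hak]
    exact List.map_congr_left (fun c _ => by rw [hag c])
  show (((l.foldl minwordWord PySem.Dict.empty).items.foldl (fun ans p => ans ++ p.2) []).map
      (fun c => String.ofList [c]))
    = (PySem.List.dedup (PySem.Str.join "" l).toList).flatMap (fun ch =>
        List.replicate
          (PySem.List.maxD (l.map (fun w => PySem.Str.count w (String.ofList [ch]))) (fun x => x) 0)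
          (String.ofList [ch]))
  have hB : ∀ ch, PySem.List.maxD (l.map (fun w => PySem.Str.count w (String.ofList [ch]))) (fun x => x) 0
      = maxCnt l ch := by
    intro ch
    have : (l.map (fun w => PySem.Str.count w (String.ofList [ch])))
        = l.map (fun w => w.toList.count ch) :=
      List.map_congr_left (fun w _ => strCount_single w ch)
    rw [this, maxD_counts]
  rw [hAitems, PySem.List.foldl_append_eq_flatMap, join_empty_toList,
    PySem.List.dedup_eq_ofList]
  simp only [List.nil_append, List.map_flatMap, List.flatMap_map]
  exact List.flatMap_congr (fun c _ => by rw [hB c]; simp [List.map_replicate])
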